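-- pv_equiv track=rewrite | github.com/PRKKILLER/Algorithm_Practice | Company-OA/Robinhood/PickingTickets.py | solution
-- ===== SOURCE A (Python) =====
-- from typing import List
-- from collections import Counter
--
-- def solution(arr: List[int]) -> int:
--     if len(arr) < 2: return len(arr)
--
--     count = list(dict(Counter(arr)).items())
--     count = sorted(count, key=lambda x: x[0])
--
--     memo = set()
--     max_len, cur_len= 0, 0
--
--     for item in count:
--         memo.add(item[0])
--         if item[0] - 1 in memo:
--             cur_len += item[1]
--             max_len = max(max_len, cur_len)
--         else:
--             cur_len = item[1]
--             max_len = max(max_len, cur_len)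
--
--     return max_len
-- ===== SOURCE B (Python) =====
-- def solution(arr):
--     best = cur = 0
--     prev = None
--     for x in sorted(arr):
--         if prev is None or x == prev or x == prev + 1:
--             cur += 1
--         else:
--             cur = 1
--         if cur > best:
--             best = cur
--         prev = x
--     return best
-- ===== Notes on version B (the rewrite author's own statement) =====
-- stated objective: simpler
-- what changed: B drops A's Counter dict, sorted distinct-items list and memo set entirely: it sorts the whole array once and does a single scan tracking prev/cur/best, extending the run when x equals prev or prev+1.
import Mathlib
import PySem

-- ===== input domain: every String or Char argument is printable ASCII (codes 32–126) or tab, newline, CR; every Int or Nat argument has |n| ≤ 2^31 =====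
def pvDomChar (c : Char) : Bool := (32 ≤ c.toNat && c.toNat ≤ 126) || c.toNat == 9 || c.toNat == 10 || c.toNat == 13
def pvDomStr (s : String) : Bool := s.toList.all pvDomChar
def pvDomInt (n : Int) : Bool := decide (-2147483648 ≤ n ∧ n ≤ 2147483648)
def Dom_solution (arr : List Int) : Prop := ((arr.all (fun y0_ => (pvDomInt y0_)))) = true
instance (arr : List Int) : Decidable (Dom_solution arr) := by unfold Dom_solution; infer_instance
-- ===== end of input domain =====

-- B replaces A's Counter + sorted-distinct-items + memo-set pass by a single scan over the fully
-- sorted list with a `prev` variable (objective: simpler; same O(n log n) cost).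


-- ===== PORT A =====
-- loop body of A: memo.add(item[0]); if item[0]-1 in memo: cur += item[1] else cur = item[1]; max_len updated
def stepA (st : Int × Int × PySem.Set Int) (item : Int × Int) : Int × Int × PySem.Set Int :=
  let memo := PySem.Set.add st.2.2 item.1
  if PySem.Set.contains memo (item.1 - 1) then
    (max st.1 (st.2.1 + item.2), st.2.1 + item.2, memo)
  else
    (max st.1 item.2, item.2, memo)

def solution (arr : List Int) : Int :=
  if arr.length < 2 then (arr.length : Int)
  else
    ((PySem.List.sorted ((PySem.Dict.counter arr).items) (fun x => x.1) false).foldl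
      stepA (0, 0, PySem.Set.empty)).1

-- ===== PORT B =====
-- loop body of B: cur += 1 when prev is None or x == prev or x == prev+1, else cur = 1; best tracked
def stepB (st : Int × Int × Option Int) (x : Int) : Int × Int × Option Int :=
  let cur : Int := match st.2.2 with
    | none => st.2.1 + 1
    | some p => if x = p ∨ x = p + 1 then st.2.1 + 1 else 1
  (if cur > st.1 then cur else st.1, cur, some x)

def solution_alt (arr : List Int) : Int :=
  ((PySem.List.sorted arr (fun x => x) false).foldl stepB (0, 0, none)).1

-- ===== PRECONDITION & SPEC =====
def Spec_solution (arr : List Int) (out : Int) : Prop := out = solution_alt arr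
instance (arr : List Int) (out : Int) : Decidable (Spec_solution arr out) := by unfold Spec_solution; infer_instance

-- ===== CLAIM (what is proved, stated in full; the proofs are below) =====
def Claim_equal_solution : Prop := ∀ (arr : List Int), Dom_solution arr → Spec_solution arr (solution arr)

-- ===== LEMMAS AND PROOFS =====

-- B's fold over m further copies of the key k it has just seen: cur grows by m, best follows.
lemma foldB_replicate (m : Nat) (k b cur : Int) (hcb : cur ≤ b) :
    List.foldl stepB (b, cur, some k) (List.replicate m k)
      = (max b (cur + m), cur + m, some k) := by
  induction m generalizing b cur with
  | zero => simp; omega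
  | succ m ih =>
      rw [List.replicate_succ, List.foldl_cons]
      show List.foldl stepB (stepB (b, cur, some k) k) _ = _
      simp only [stepB, true_or, if_true]
      have h1 : cur + 1 ≤ (if cur + 1 > b then cur + 1 else b) := by omega
      rw [ih _ _ h1]
      refine Prod.ext ?_ (Prod.ext ?_ rfl) <;> (show _ = _) <;> push_cast <;> omega

-- B's fold over one whole block of c copies of k, arriving with previous value p.
lemma foldB_run (c : Nat) (hc : 0 < c) (k b cur : Int) (p : Option Int) (hcb : cur ≤ b) :
    List.foldl stepB (b, cur, p) (List.replicate c k)
      = (let cur' : Int := if p = none ∨ p = some k ∨ p = some (k - 1) then cur + c else (c : Int)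
         (max b cur', cur', some k)) := by
  obtain ⟨m, rfl⟩ : ∃ m, c = m + 1 := ⟨c - 1, by omega⟩
  rw [List.replicate_succ, List.foldl_cons]
  show List.foldl stepB (stepB (b, cur, p) k) _ = _
  match p with
  | none =>
      simp only [stepB]
      have h1 : cur + 1 ≤ (if cur + 1 > b then cur + 1 else b) := by omega
      rw [foldB_replicate m k _ _ h1]
      simp only [true_or, if_pos]
      refine Prod.ext ?_ (Prod.ext ?_ rfl) <;> (show _ = _) <;> push_cast <;> omega
  | some q =>
      simp only [stepB]
      by_cases hq : k = q ∨ k = q + 1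
      · rw [if_pos hq]
        have h1 : cur + 1 ≤ (if cur + 1 > b then cur + 1 else b) := by omega
        rw [foldB_replicate m k _ _ h1]
        have hcond : (some q = none ∨ some q = some k ∨ some q = some (k - 1)) := by
          rcases hq with h | h
          · exact Or.inr (Or.inl (by rw [h]))
          · exact Or.inr (Or.inr (by rw [h]; norm_num))
        rw [if_pos hcond]
        refine Prod.ext ?_ (Prod.ext ?_ rfl) <;> (show _ = _) <;> push_cast <;> omega
      · rw [if_neg hq]
        have h1 : (1 : Int) ≤ (if 1 > b then 1 else b) := by omega
        rw [foldB_replicate m k _ _ h1]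
        have hcond : ¬ (some q = none ∨ some q = some k ∨ some q = some (k - 1)) := by
          simp only [Option.some.injEq, reduceCtorEq, false_or]
          rintro (h | h) <;> exact hq (by omega)
        rw [if_neg hcond]
        refine Prod.ext ?_ (Prod.ext ?_ rfl) <;> (show _ = _) <;> push_cast <;> omega

-- Block-by-block equivalence of the two folds, once the first block has been consumed.
lemma fold_main (cnt : Int → Nat) (ds : List Int) :
    ∀ (p b cur : Int) (memo : PySem.Set Int),
      ds.Pairwise (· < ·) → (∀ k ∈ ds, 0 < cnt k) → (∀ k ∈ ds, p < k) →
      (∀ x ∈ memo, x ≤ p) → p ∈ memo → cur ≤ b →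
      (List.foldl stepA (b, cur, memo) (ds.map (fun k => (k, (cnt k : Int))))).1
        = (List.foldl stepB (b, cur, some p)
            (ds.flatMap (fun k => List.replicate (cnt k) k))).1 := by
  induction ds with
  | nil => intros; rfl
  | cons k t ih =>
      intro p b cur memo hpw hcnt hlt hmemo hpmem hcb
      have hkpos : 0 < cnt k := hcnt k (by simp)
      have hpk : p < k := hlt k (by simp)
      -- A side: one step on the item (k, cnt k)
      have hknotm : k ∉ memo := fun h => by have := hmemo k h; omega
      have hadd : PySem.Set.add memo k = memo ++ [k] := by
        simp [PySem.Set.add, hknotm]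
      have hmem1 : (k - 1 ∈ memo ++ [k]) ↔ p = k - 1 := by
        simp only [List.mem_append, List.mem_singleton]
        constructor
        · rintro (h | h)
          · have := hmemo _ h; omega
          · omega
        · rintro rfl; exact Or.inl hpmem
      rw [List.map_cons, List.foldl_cons, List.flatMap_cons, List.foldl_append]
      -- evaluate stepA
      have hA : stepA (b, cur, memo) (k, (cnt k : Int))
          = (max b (if p = k - 1 then cur + cnt k else (cnt k : Int)),
             (if p = k - 1 then cur + cnt k else (cnt k : Int)), memo ++ [k]) := by
        simp only [stepA, hadd]
        by_cases hpk1 : p = k - 1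
        · rw [if_pos ((PySem.Set.contains_iff _ _).mpr (hmem1.mpr hpk1))]
          simp [hpk1]
        · rw [if_neg (fun h => hpk1 (hmem1.mp ((PySem.Set.contains_iff _ _).mp h)))]
          simp [hpk1]
      -- evaluate B's block
      have hB := foldB_run (cnt k) hkpos k b cur (some p) hcb
      have hcond : (some p = none ∨ some p = some k ∨ some p = some (k - 1)) ↔ p = k - 1 := by
        simp only [Option.some.injEq, reduceCtorEq, false_or]
        constructor
        · rintro (h | h); · omega
          · exact h
        · exact Or.inr
      rw [hA, hB]
      simp only [hcond]
      set cur' : Int := if p = k - 1 then cur + cnt k else (cnt k : Int) with hcur'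
      exact ih k (max b cur') cur' (memo ++ [k]) hpw.of_cons (fun x hx => hcnt x (by simp [hx]))
        (fun x hx => (List.pairwise_cons.mp hpw).1 x hx)
        (fun x hx => by
          rcases List.mem_append.mp hx with h | h
          · have := hmemo x h; omega
          · simp at h; omega)
        (by simp) (le_max_right _ _)

-- count of any value in the concatenation of replicate-blocks over nodup keys
lemma count_flatMap_replicate (cnt : Int → Nat) (ds : List Int) (hd : ds.Nodup) (a : Int) :
    (ds.flatMap (fun k => List.replicate (cnt k) k)).count a
      = if a ∈ ds then cnt a else 0 := by
  induction ds with
  | nil => simp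
  | cons k t ih =>
      rw [List.flatMap_cons, List.count_append, ih hd.of_cons]
      rw [List.count_replicate]
      by_cases hak : a = k
      · subst hak
        have : a ∉ t := (List.nodup_cons.mp hd).1
        simp [this]
      · simp [hak, Ne.symm hak]

-- the concatenation of replicate-blocks over strictly increasing keys is nondecreasing
lemma pairwise_flatMap_replicate (cnt : Int → Nat) (ds : List Int)
    (h : ds.Pairwise (· < ·)) :
    (ds.flatMap (fun k => List.replicate (cnt k) k)).Pairwise (· ≤ ·) := by
  induction ds with
  | nil => simp
  | cons k t ih =>
      rw [List.flatMap_cons, List.pairwise_append]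
      refine ⟨List.pairwise_replicate.mpr (Or.inr le_rfl), ih h.of_cons, ?_⟩
      intro x hx y hy
      have hxk : x = k := List.eq_of_mem_replicate hx
      obtain ⟨u, hu, hyu'⟩ := List.mem_flatMap.mp hy
      have hyu : y = u := List.eq_of_mem_replicate hyu'
      rw [hxk, hyu]
      exact le_of_lt ((List.pairwise_cons.mp h).1 u hu)

-- ===== VERDICT (by name: the statement is the Claim_ definition above) =====
theorem solution_spec : Claim_equal_solution := by
  intro arr _
  unfold Spec_solution
  match harr : arr with
  | [] => rfl
  | [a] =>
      show (1 : Int) = _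
      have h1 : PySem.List.sorted [a] (fun x : Int => x) false = [a] :=
        PySem.List.sorted_eq_self_of_pairwise [a] (fun x : Int => x) (by simp)
      rw [solution_alt, h1]
      norm_num [stepB]
  | a :: b :: rest =>
      set arr := a :: b :: rest with harr'
      have hlen : ¬ arr.length < 2 := by simp [harr']
      rw [solution, if_neg hlen, solution_alt]
      set ds := PySem.List.sorted (PySem.Set.ofList arr) (fun x => x) false with hds
      have hdsperm : ds.Perm (PySem.Set.ofList arr) := PySem.List.sorted_perm _ _ _
      have hdspw : ds.Pairwise (· < ·) := PySem.List.sorted_ofList_pairwise_lt arr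
      have hdsnd : ds.Nodup := hdsperm.nodup_iff.mpr (PySem.Set.nodup_ofList arr)
      have hdsmem : ∀ x, x ∈ ds ↔ x ∈ arr := by
        intro x
        rw [hdsperm.mem_iff, PySem.Set.mem_ofList]
      -- the sorted item list of the counter
      have hitems : PySem.List.sorted ((PySem.Dict.counter arr).items) (fun x => x.1) false
          = ds.map (fun k => (k, (arr.count k : Int))) := by
        rw [PySem.Dict.items_counter]
        apply PySem.List.sorted_eq_of_perm_of_pairwise_lt
        · exact hdsperm.map _
        · exact List.Pairwise.map _ (fun a b h => h) hdspw
      -- the sorted array is the concatenation of the blocks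
      have hsorted : PySem.List.sorted arr (fun x => x) false
          = ds.flatMap (fun k => List.replicate (arr.count k) k) := by
        apply PySem.List.sorted_id_eq_of_perm_of_pairwise
        · rw [List.perm_iff_count]
          intro x
          rw [count_flatMap_replicate _ _ hdsnd]
          by_cases hx : x ∈ arr
          · simp [(hdsmem x).mpr hx]
          · rw [if_neg (fun h => hx ((hdsmem x).mp h)), List.count_eq_zero_of_not_mem hx]
        · exact pairwise_flatMap_replicate _ _ hdspw
      rw [hitems, hsorted]
      -- ds is nonempty; peel the first block on both sides
      clear_value ds
      have hne : ds ≠ [] := by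
        intro h
        have ha : a ∈ ds := (hdsmem a).mpr (by simp [harr'])
        rw [h] at ha; simp at ha
      obtain ⟨k0, t, rfl⟩ := List.exists_cons_of_ne_nil hne
      have hk0pos : 0 < arr.count k0 :=
        List.count_pos_iff.mpr ((hdsmem k0).mp (by simp))
      have hcnt : ∀ k ∈ k0 :: t, 0 < arr.count k := by
        intro k hk
        exact List.count_pos_iff.mpr ((hdsmem k).mp hk)
      rw [List.map_cons, List.foldl_cons, List.flatMap_cons, List.foldl_append]
      -- first A step
      have hA0 : stepA (0, 0, PySem.Set.empty) (k0, (arr.count k0 : Int))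
          = (max 0 ((arr.count k0 : Int)), ((arr.count k0 : Int)), [k0]) := by
        simp only [stepA]
        rw [if_neg]
        · rfl
        · intro h
          have hm := (PySem.Set.contains_iff _ _).mp h
          simp [PySem.Set.add, PySem.Set.empty, PySem.Set.contains] at hm
      -- first B block
      have hB0 := foldB_run (arr.count k0) hk0pos k0 0 0 none le_rfl
      rw [hA0, hB0]
      simp only [true_or, if_pos, zero_add]
      exact fold_main (fun k => arr.count k) t k0 (max 0 ((arr.count k0 : Int))) ((arr.count k0 : Int)) [k0]
        hdspw.of_cons (fun k hk => hcnt k (by simp [hk]))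
        (fun k hk => (List.pairwise_cons.mp hdspw).1 k hk)
        (by simp) (by simp) (le_max_right _ _)
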